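-- pv_equiv track=rewrite | github.com/spygaurad/CSC631SoftwareEngineering | BinaryCalculation/BinaryCalculation.py | ripple_subtract_binary
-- ===== SOURCE A (Python) =====
-- def xorGate(a: str, b: str) -> str:
--     return '1' if a != b else '0'
--
-- def andGate(a: str, b: str) -> str:
--     return '1' if a == '1' and b == '1' else '0'
--
-- def notGate(a: str) -> str:
--     return '0' if a == '1' else '1'
--
-- def shiftLeft(a: str, n: int) -> str:
--     return a[n:] + '0' * n
--
-- def _bitwise_not(a: str) -> str:
--     return ''.join(notGate(ch) for ch in a)
--
-- def _bitwise_and(a: str, b: str) -> str: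
--     a, b = _pad_equal(a, b)
--     return ''.join(andGate(x, y) for x, y in zip(a, b))
--
-- def _bitwise_xor(a: str, b: str) -> str:
--     a, b = _pad_equal(a, b)
--     return ''.join(xorGate(x, y) for x, y in zip(a, b))
--
-- def _pad_equal(a: str, b: str) -> tuple[str, str]:
--     n = max(len(a), len(b))
--     return a.zfill(n), b.zfill(n)
--
-- def _is_all_zero(s: str) -> bool:
--     return all(ch == '0' for ch in s)
--
-- def ripple_subtract_binary(a: str, b: str) -> str:
--     #Ensuring both are of same length
--     #Pad by the maximum length
--     a,b = _pad_equal(a,b)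
--     borrow = 0
--
--     while not _is_all_zero(b):
--         borrow = _bitwise_and(_bitwise_not(a), b)
--         a = _bitwise_xor(a, b)
--         b = shiftLeft(borrow, 1)
--
--     return ''.join(a).lstrip('0') or '0'
-- ===== SOURCE B (Python) =====
-- def ripple_subtract_binary(a: str, b: str) -> str:
--     n = max(len(a), len(b))
--     a = a.zfill(n)
--     b = b.zfill(n)
--     if all(ch == '0' for ch in b):
--         return a.lstrip('0') or '0'
--     # x = the XOR of the two padded strings read as a binary number,
--     # y = the borrow mask; the whole ripple loop collapses to (x - 2*y) mod 2**n
--     x = int(''.join('1' if p != q else '0' for p, q in zip(a, b)), 2)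
--     y = int(''.join('1' if p != '1' and q == '1' else '0' for p, q in zip(a, b)), 2)
--     return bin((x - 2 * y) % (1 << n))[2:]
-- ===== Notes on version B (the rewrite author's own statement) =====
-- stated objective: faster
-- what changed: Replaces the ripple loop (up to n rounds, each rebuilding three length-n strings with per-character gate calls) by arithmetic: one pass builds the XOR value x and the borrow mask y, and the whole loop collapses to the closed form (x - 2*y) mod 2^n, formatted with bin().
import Mathlib
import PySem

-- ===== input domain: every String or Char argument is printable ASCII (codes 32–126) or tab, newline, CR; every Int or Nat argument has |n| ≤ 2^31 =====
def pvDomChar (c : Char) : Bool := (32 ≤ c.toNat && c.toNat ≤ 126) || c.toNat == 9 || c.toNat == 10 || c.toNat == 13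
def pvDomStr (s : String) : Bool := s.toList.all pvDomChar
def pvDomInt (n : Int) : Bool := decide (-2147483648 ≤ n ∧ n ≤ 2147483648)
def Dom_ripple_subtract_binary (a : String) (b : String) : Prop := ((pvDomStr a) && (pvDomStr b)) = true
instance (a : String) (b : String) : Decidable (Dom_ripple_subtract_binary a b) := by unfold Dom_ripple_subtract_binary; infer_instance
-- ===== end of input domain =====

-- B is the arithmetic re-implementation: one pass builds the XOR value x and the borrow
-- mask y, and A's whole ripple loop collapses to (x - 2*y) mod 2^n (objective: faster).

-- shared helper: Python str.zfill (left-pad with '0', a leading '+'/'-' stays in front)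
def pvZfill (l : List Char) (n : Nat) : List Char :=
  if n ≤ l.length then l
  else
    match l with
    | [] => List.replicate n '0'
    | c :: t =>
      if c = '+' ∨ c = '-' then c :: (List.replicate (n - (c :: t).length) '0' ++ t)
      else List.replicate (n - (c :: t).length) '0' ++ (c :: t)

-- shared helper: Python s.lstrip('0') or '0'
def pvLstrip0OrZero (l : List Char) : List Char :=
  let s := l.dropWhile (· = '0')
  if s = [] then ['0'] else s

-- ===== PORT A =====
def pvXorG (x y : Char) : Char := if x ≠ y then '1' else '0'           -- xorGate
def pvAndG (x y : Char) : Char := if x = '1' ∧ y = '1' then '1' else '0'  -- andGate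
def pvNotG (x : Char) : Char := if x = '1' then '0' else '1'            -- notGate
def pvShiftLeft (l : List Char) (n : Nat) : List Char := l.drop n ++ List.replicate n '0'
def pvBitwiseNot (l : List Char) : List Char := l.map pvNotG
def pvPadEqual (a b : List Char) : List Char × List Char :=
  (pvZfill a (max a.length b.length), pvZfill b (max a.length b.length))
def pvBitwiseAnd (a b : List Char) : List Char :=
  List.zipWith pvAndG (pvPadEqual a b).1 (pvPadEqual a b).2
def pvBitwiseXor (a b : List Char) : List Char :=
  List.zipWith pvXorG (pvPadEqual a b).1 (pvPadEqual a b).2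
def pvIsAllZero (l : List Char) : Bool := l.all (· = '0')
-- the while loop; the fuel n+1 is only a totality guard (proved sufficient below)
def pvLoop : Nat → List Char → List Char → List Char
  | 0, a, _ => a
  | f + 1, a, b =>
    if pvIsAllZero b then a
    else pvLoop f (pvBitwiseXor a b) (pvShiftLeft (pvBitwiseAnd (pvBitwiseNot a) b) 1)

def ripple_subtract_binary (a : String) (b : String) : String :=
  let p := pvPadEqual a.toList b.toList
  String.ofList (pvLstrip0OrZero (pvLoop (p.1.length + 1) p.1 p.2))

-- ===== PORT B =====
-- int(s, 2) for a '0'/'1' string, MSB first (hand fold, matching the Python builtin)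
def pvVal (l : List Char) : Nat := l.foldl (fun acc c => 2 * acc + (if c = '1' then 1 else 0)) 0
-- bin(v)[2:]: minimal binary representation, MSB first
def pvBinDigits : Nat → List Char
  | 0 => []
  | v + 1 => pvBinDigits ((v + 1) / 2) ++ [if (v + 1) % 2 = 1 then '1' else '0']
def pvBin (v : Nat) : List Char := if v = 0 then ['0'] else pvBinDigits v

def ripple_subtract_binary_alt (a : String) (b : String) : String :=
  let n := max a.toList.length b.toList.length
  let a' := pvZfill a.toList n
  let b' := pvZfill b.toList n
  if b'.all (· = '0') then String.ofList (pvLstrip0OrZero a')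
  else
    let x : Int := pvVal (List.zipWith (fun p q => if p ≠ q then '1' else '0') a' b')
    let y : Int := pvVal (List.zipWith (fun p q => if p ≠ '1' ∧ q = '1' then '1' else '0') a' b')
    -- (x - 2*y) % (1 << n); 1 << n = 2^n
    String.ofList (pvBin (PySem.Int.mod (x - 2 * y) (2 ^ n)).toNat)

-- ===== PRECONDITION & SPEC =====
def Spec_ripple_subtract_binary (a : String) (b : String) (out : String) : Prop := out = ripple_subtract_binary_alt a b
instance (a : String) (b : String) (out : String) : Decidable (Spec_ripple_subtract_binary a b out) := by unfold Spec_ripple_subtract_binary; infer_instance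

-- ===== CLAIM (what is proved, stated in full; the proofs are below) =====
def Claim_equal_ripple_subtract_binary : Prop := ∀ (a : String) (b : String), Dom_ripple_subtract_binary a b → Spec_ripple_subtract_binary a b (ripple_subtract_binary a b)

-- ===== LEMMAS AND PROOFS =====

def PvBin (l : List Char) : Prop := ∀ c ∈ l, c = '0' ∨ c = '1'

theorem pvZfill_length (l : List Char) (n : Nat) : (pvZfill l n).length = max l.length n := by
  by_cases h : n ≤ l.length
  · simp [pvZfill, h]
  · cases l with
    | nil =>
      cases n with
      | zero => simp [pvZfill]
      | succ m => simp [pvZfill]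
    | cons c t => simp only [pvZfill, if_neg h]; split_ifs <;> simp <;> omega

theorem pvZfill_of_le (l : List Char) (n : Nat) (h : n ≤ l.length) : pvZfill l n = l := by
  simp [pvZfill, h]

-- pvVal with an arbitrary accumulator
theorem pvVal_foldl (l : List Char) (acc : Nat) :
    l.foldl (fun acc c => 2 * acc + (if c = '1' then 1 else 0)) acc = acc * 2 ^ l.length + pvVal l := by
  induction l generalizing acc with
  | nil => simp [pvVal]
  | cons c t ih =>
    have h2 := ih (2 * 0 + (if c = '1' then 1 else 0))
    simp only [pvVal, List.foldl_cons, List.length_cons] at *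
    rw [ih, h2]; ring

theorem pvVal_cons (c : Char) (t : List Char) :
    pvVal (c :: t) = (if c = '1' then 1 else 0) * 2 ^ t.length + pvVal t := by
  have := pvVal_foldl t (2 * 0 + (if c = '1' then 1 else 0))
  simpa [pvVal] using this

theorem pvVal_append (l : List Char) (c : Char) :
    pvVal (l ++ [c]) = 2 * pvVal l + (if c = '1' then 1 else 0) := by
  simp [pvVal, List.foldl_append]

theorem pvVal_lt (l : List Char) : pvVal l < 2 ^ l.length := by
  induction l with
  | nil => simp [pvVal]
  | cons c t ih =>
    rw [pvVal_cons]
    have : (2 : Nat) ^ (c :: t).length = 2 * 2 ^ t.length := by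
      simp [List.length_cons, pow_succ]; ring
    rw [this]
    split_ifs <;> omega

theorem pvVal_zero_of_allzero (l : List Char) (h : l.all (· = '0') = true) : pvVal l = 0 := by
  induction l with
  | nil => rfl
  | cons c t ih =>
    simp only [List.all_cons, Bool.and_eq_true, decide_eq_true_eq] at h
    rw [pvVal_cons, h.1, ih h.2]
    simp

-- ===== the final formatting: lstrip('0') or '0' of a binary string is bin() of its value =====
theorem pvBinDigits_pos (v : Nat) (h : 0 < v) :
    pvBinDigits v = pvBinDigits (v / 2) ++ [if v % 2 = 1 then '1' else '0'] := by
  cases v with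
  | zero => omega
  | succ w => rw [pvBinDigits]

theorem pvBinDigits_msb (t : List Char) (hb : PvBin t) :
    pvBinDigits (pvVal ('1' :: t)) = '1' :: t := by
  induction t using List.reverseRecOn with
  | nil =>
    have h1 : pvVal ['1'] = 1 := by decide
    rw [h1, pvBinDigits_pos 1 (by omega)]
    norm_num
    simp [pvBinDigits]
  | append_singleton l c ih =>
    have hbl : PvBin l := fun d hd => hb d (by simp [hd])
    have hbc : c = '0' ∨ c = '1' := hb c (by simp)
    have hpos : 1 ≤ pvVal ('1' :: l) := by
      have he : (if ('1':Char) = '1' then (1:Nat) else 0) = 1 := if_pos rfl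
      rw [pvVal_cons, he, one_mul]
      have h2 : 1 ≤ (2:Nat) ^ l.length := Nat.one_le_two_pow
      omega
    have hv : pvVal ('1' :: (l ++ [c])) = 2 * pvVal ('1' :: l) + (if c = '1' then 1 else 0) := by
      have : ('1' :: (l ++ [c])) = ('1' :: l) ++ [c] := by simp
      rw [this, pvVal_append]
    rw [hv, pvBinDigits_pos _ (by have := hpos; split_ifs <;> omega)]
    have hdiv : (2 * pvVal ('1' :: l) + (if c = '1' then 1 else 0)) / 2 = pvVal ('1' :: l) := by
      split_ifs <;> omega
    have hmod : (2 * pvVal ('1' :: l) + (if c = '1' then 1 else 0)) % 2 = (if c = '1' then 1 else 0) := by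
      split_ifs <;> omega
    rw [hdiv, hmod, ih hbl]
    rcases hbc with rfl | rfl <;> simp

theorem pvLstrip0OrZero_eq_pvBin (l : List Char) (hb : PvBin l) :
    pvLstrip0OrZero l = pvBin (pvVal l) := by
  induction l with
  | nil => rfl
  | cons c t ih =>
    have hbt : PvBin t := fun d hd => hb d (by simp [hd])
    rcases hb c (by simp) with rfl | rfl
    · have h1 : pvLstrip0OrZero ('0' :: t) = pvLstrip0OrZero t := by
        simp [pvLstrip0OrZero]
      have h2 : pvVal ('0' :: t) = pvVal t := by rw [pvVal_cons]; simp
      rw [h1, h2, ih hbt]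
    · have h1 : pvLstrip0OrZero ('1' :: t) = '1' :: t := by
        simp [pvLstrip0OrZero]
      have hpos : 1 ≤ pvVal ('1' :: t) := by
        have he : (if ('1':Char) = '1' then (1:Nat) else 0) = 1 := if_pos rfl
        rw [pvVal_cons, he, one_mul]
        have h2 : 1 ≤ (2:Nat) ^ t.length := Nat.one_le_two_pow
        omega
      rw [h1, pvBin, if_neg (by omega), pvBinDigits_msb t hbt]

-- ===== trailing-zero counter (termination measure) =====
def pvCtz : List Char → Nat
  | [] => 0
  | c :: t => if c = '0' then pvCtz t + 1 else 0

theorem pvCtz_le_length (l : List Char) : pvCtz l ≤ l.length := by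
  induction l with
  | nil => simp [pvCtz]
  | cons c t ih => simp only [pvCtz, List.length_cons]; split_ifs <;> omega

theorem pvCtz_eq_length_iff (l : List Char) : pvCtz l = l.length ↔ l.all (· = '0') = true := by
  induction l with
  | nil => simp [pvCtz]
  | cons c t ih =>
    have := pvCtz_le_length t
    simp only [pvCtz, List.length_cons, List.all_cons, Bool.and_eq_true, decide_eq_true_eq]
    split_ifs with hc
    · simp only [hc, true_and]
      constructor
      · intro h; exact ih.mp (by omega)
      · intro h; rw [ih.mpr h]
    · simp [hc]

theorem pvCtz_zipWith_ge (g : Char → Char → Char) (hg : ∀ p, g p '0' = '0') :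
    ∀ a b : List Char, a.length = b.length → pvCtz b ≤ pvCtz (List.zipWith g a b) := by
  intro a
  induction a with
  | nil =>
    intro b h
    cases b with
    | nil => simp
    | cons q u => simp at h
  | cons p t ih =>
    intro b h
    cases b with
    | nil => simp [pvCtz]
    | cons q u =>
      simp only [List.length_cons] at h
      simp only [List.zipWith_cons_cons, pvCtz]
      split_ifs with hq hz hz
      · exact Nat.succ_le_succ (ih u (by omega))
      · exfalso; rw [hq, hg p] at hz; exact hz rfl
      · omega
      · omega

theorem pvCtz_append_single (u : List Char) (h : Char) :
    pvCtz (u ++ [h]) = if u.all (· = '0') then u.length + (if h = '0' then 1 else 0) else pvCtz u := by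
  induction u with
  | nil => simp [pvCtz]
  | cons c t ih =>
    by_cases hc : c = '0'
    · have h1 : pvCtz ((c :: t) ++ [h]) = pvCtz (t ++ [h]) + 1 := by simp [pvCtz, hc]
      rw [h1, ih]
      by_cases ha : t.all (· = '0') = true
      · simp only [List.all_cons, List.length_cons]
        simp [hc, ha]
        split_ifs <;> omega
      · simp [pvCtz, hc, ha]
    · have h2 : pvCtz (c :: t) = 0 := by simp [pvCtz, hc]
      simp only [List.cons_append, pvCtz, if_neg hc]
      simp [hc]

-- ===== the ripple step, value-wise =====
theorem pv_step_identity : ∀ a b : List Char, a.length = b.length → PvBin a → PvBin b →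
    pvVal (List.zipWith pvXorG a b) + pvVal b
      = pvVal a + 2 * pvVal (List.zipWith (fun p q => pvAndG (pvNotG p) q) a b) := by
  intro a
  induction a with
  | nil =>
    intro b h _ _
    cases b with
    | nil => simp [pvVal]
    | cons q u => simp at h
  | cons p t ih =>
    intro b h hba hbb
    cases b with
    | nil => simp at h
    | cons q u =>
      have hl : t.length = u.length := by simpa using h
      have hbt : PvBin t := fun d hd => hba d (by simp [hd])
      have hbu : PvBin u := fun d hd => hbb d (by simp [hd])
      have IH := ih u hl hbt hbu
      simp only [List.zipWith_cons_cons]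
      rw [pvVal_cons (pvXorG p q), pvVal_cons q, pvVal_cons p, pvVal_cons (pvAndG (pvNotG p) q)]
      have l1 : (List.zipWith pvXorG t u).length = u.length := by simp [hl]
      have l2 : (List.zipWith (fun p q => pvAndG (pvNotG p) q) t u).length = u.length := by
        simp [hl]
      rw [l1, l2, hl]
      set X := pvVal (List.zipWith pvXorG t u) with hX
      set W := pvVal (List.zipWith (fun p q => pvAndG (pvNotG p) q) t u) with hW
      rcases hba p (by simp) with rfl | rfl <;> rcases hbb q (by simp) with rfl | rfl <;>
        simp [pvXorG, pvAndG, pvNotG] <;> omega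

theorem pvVal_shift (l : List Char) (hl : l ≠ []) :
    pvVal (l.drop 1 ++ ['0']) = (2 * pvVal l) % 2 ^ l.length := by
  cases l with
  | nil => simp at hl
  | cons c t =>
    have h0 : pvVal (t ++ ['0']) = 2 * pvVal t := by rw [pvVal_append]; simp
    have hv : pvVal t < 2 ^ t.length := pvVal_lt t
    have hpow : (2:Nat) ^ (c :: t).length = 2 * 2 ^ t.length := by
      simp [List.length_cons, pow_succ]; ring
    simp only [List.drop_succ_cons, List.drop_zero]
    rw [h0, pvVal_cons, hpow]
    split_ifs with hc
    · have harg : 2 * (1 * 2 ^ t.length + pvVal t) = 2 * pvVal t + (2 * 2 ^ t.length) * 1 := by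
        ring
      rw [harg, Nat.add_mul_mod_self_left, Nat.mod_eq_of_lt (by omega)]
    · rw [zero_mul, zero_add, Nat.mod_eq_of_lt (by omega)]

theorem pvBin_zipWith (g : Char → Char → Char) (hg : ∀ p q, g p q = '0' ∨ g p q = '1') :
    ∀ a b : List Char, PvBin (List.zipWith g a b) := by
  intro a
  induction a with
  | nil => intro b c hc; simp at hc
  | cons p t ih =>
    intro b c hc
    cases b with
    | nil => simp at hc
    | cons q u =>
      simp only [List.zipWith_cons_cons, List.mem_cons] at hc
      rcases hc with rfl | hc
      · exact hg p q
      · exact ih u c hc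

-- the two zipWith masks of port B are the gate compositions of port A
theorem pvBorrow_lambda : (fun p q => pvAndG (pvNotG p) q) =
    (fun p q => if p ≠ '1' ∧ q = '1' then '1' else '0') := by
  funext p q
  by_cases hp : p = '1' <;> by_cases hq : q = '1' <;> simp [pvAndG, pvNotG, hp, hq]

-- one ripple step from a not-all-zero b strictly increases the trailing-zero count
theorem pvStep_tz (a b : List Char) (n : Nat) (hla : a.length = n) (hlb : b.length = n)
    (hz : ¬ b.all (· = '0') = true) :
    pvCtz b.reverse + 1 ≤
      pvCtz (((List.zipWith (fun p q => pvAndG (pvNotG p) q) a b).drop 1 ++ ['0']).reverse) ∧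
    pvCtz b.reverse < n := by
  have hg : ∀ p, pvAndG (pvNotG p) '0' = '0' := by intro p; simp [pvAndG]
  have htzb : pvCtz b.reverse < n := by
    have h1 := pvCtz_le_length b.reverse
    have h2 : ¬ pvCtz b.reverse = b.reverse.length := by
      rw [pvCtz_eq_length_iff]
      simpa using hz
    simp only [List.length_reverse, hlb] at h1 h2
    omega
  refine ⟨?_, htzb⟩
  set borrow := List.zipWith (fun p q => pvAndG (pvNotG p) q) a b with hbor
  have hlbor : borrow.length = n := by simp [hbor, hla, hlb]
  have hn1 : 1 ≤ n := by
    rcases Nat.eq_zero_or_pos n with h0 | h1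
    · exfalso; apply hz; rw [List.all_eq_true]; intro c hc
      have : b = [] := List.eq_nil_of_length_eq_zero (by omega)
      simp [this] at hc
    · exact h1
  have hbornil : borrow ≠ [] := by
    intro hx; rw [hx] at hlbor; simp at hlbor; omega
  obtain ⟨h, t, hht⟩ := List.exists_cons_of_ne_nil hbornil
  have hgezip : pvCtz b.reverse ≤ pvCtz borrow.reverse := by
    rw [hbor, List.reverse_zipWith (by omega)]
    exact pvCtz_zipWith_ge _ hg a.reverse b.reverse (by simp; omega)
  have hrevb : borrow.reverse = t.reverse ++ [h] := by simp [hht]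
  have hlt : t.length = n - 1 := by
    have := hlbor; rw [hht] at this; simp at this; omega
  have hctz_t : pvCtz b.reverse ≤ pvCtz t.reverse := by
    rw [hrevb, pvCtz_append_single] at hgezip
    by_cases hall : t.reverse.all (· = '0') = true
    · have h1 : pvCtz t.reverse = t.reverse.length := (pvCtz_eq_length_iff _).mpr hall
      simp only [List.length_reverse] at h1
      omega
    · rw [if_neg hall] at hgezip
      exact hgezip
  have hdrop : (borrow.drop 1 ++ ['0']).reverse = '0' :: t.reverse := by simp [hht]
  rw [hdrop]
  simp [pvCtz]
  omega

-- ===== the loop: its result is binary with value (val a + 2^n - val b) mod 2^n =====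
theorem pvLoop_val (n : Nat) : ∀ f a b, PvBin a → PvBin b → a.length = n → b.length = n →
    n - pvCtz b.reverse < f →
    PvBin (pvLoop f a b) ∧ pvVal (pvLoop f a b) = (pvVal a + 2 ^ n - pvVal b) % 2 ^ n := by
  intro f
  induction f with
  | zero => intro a b _ _ _ _ hf; omega
  | succ f ih =>
    intro a b hba hbb hla hlb hf
    by_cases hz : pvIsAllZero b = true
    · rw [pvLoop, if_pos hz]
      have h0 : pvVal b = 0 := pvVal_zero_of_allzero b hz
      have hlt : pvVal a < 2 ^ n := hla ▸ pvVal_lt a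
      refine ⟨hba, ?_⟩
      rw [h0, Nat.sub_zero, Nat.add_mod_right, Nat.mod_eq_of_lt hlt]
    · rw [pvLoop, if_neg hz]
      have hz' : ¬ b.all (· = '0') = true := hz
      -- the padding inside the bitwise helpers is a no-op on equal-length lists
      have hpad : pvPadEqual a b = (a, b) := by
        simp [pvPadEqual, hla, hlb, pvZfill_of_le]
      have hpadn : pvPadEqual (pvBitwiseNot a) b = (pvBitwiseNot a, b) := by
        simp [pvPadEqual, pvBitwiseNot, hla, hlb, pvZfill_of_le]
      have hxor : pvBitwiseXor a b = List.zipWith pvXorG a b := by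
        rw [pvBitwiseXor, hpad]
      have hand : pvBitwiseAnd (pvBitwiseNot a) b
          = List.zipWith (fun p q => pvAndG (pvNotG p) q) a b := by
        rw [pvBitwiseAnd, hpadn, pvBitwiseNot, List.zipWith_map_left]
      set a1 := List.zipWith pvXorG a b with ha1
      set borrow := List.zipWith (fun p q => pvAndG (pvNotG p) q) a b with hbor
      have hla1 : a1.length = n := by simp [ha1, hla, hlb]
      have hlbor : borrow.length = n := by simp [hbor, hla, hlb]
      obtain ⟨htz1, htzb⟩ := pvStep_tz a b n hla hlb hz'
      have hn1 : 1 ≤ n := by omega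
      have hbornil : borrow ≠ [] := by
        intro hx; rw [hx] at hlbor; simp at hlbor; omega
      have hshift : pvShiftLeft borrow 1 = borrow.drop 1 ++ ['0'] := by
        simp [pvShiftLeft]
      set b1 := borrow.drop 1 ++ ['0'] with hb1
      have hlb1 : b1.length = n := by
        simp [hb1, hlbor]
        omega
      have hbba1 : PvBin a1 := pvBin_zipWith _ (by
        intro p q; by_cases h : p = q <;> simp [pvXorG, h]) a b
      have hbbb1 : PvBin b1 := by
        intro c hc
        rcases List.mem_append.mp hc with hc | hc
        · exact pvBin_zipWith _ (by
            intro p q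
            by_cases h : pvNotG p = '1' ∧ q = '1' <;> simp [pvAndG, h]) a b c
            (List.mem_of_mem_drop hc)
        · simp at hc; left; exact hc
      have hfuel : n - pvCtz b1.reverse < f := by omega
      rw [hxor, hand, hshift]
      obtain ⟨hbinres, hvalres⟩ := ih a1 b1 hbba1 hbbb1 hla1 hlb1 hfuel
      refine ⟨hbinres, ?_⟩
      rw [hvalres]
      -- value bookkeeping: one step preserves (val a + 2^n - val b) mod 2^n
      have key := pv_step_identity a b (by omega) hba hbb
      rw [← ha1, ← hbor] at key
      have hvb1 : pvVal b1 = (2 * pvVal borrow) % 2 ^ n := by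
        rw [hb1, ← hlbor]
        exact pvVal_shift borrow hbornil
      have hMpos : 0 < 2 ^ n := pow_pos (by omega : (0:ℕ) < 2) n
      have hvb : pvVal b < 2 ^ n := hlb ▸ pvVal_lt b
      have hvbor : pvVal borrow < 2 ^ n := hlbor ▸ pvVal_lt borrow
      have hva1 : pvVal a1 < 2 ^ n := hla1 ▸ pvVal_lt a1
      set M := 2 ^ n with hM
      set w := pvVal borrow with hw
      have hdm := Nat.div_add_mod (2 * w) M
      have hklt : 2 * w / M ≤ 1 := by
        have : 2 * w < 2 * M := by omega
        have := Nat.div_lt_iff_lt_mul hMpos |>.mpr (by omega : 2 * w < 2 * M)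
        omega
      rcases Nat.le_one_iff_eq_zero_or_eq_one.mp hklt with hk | hk <;>
        rw [hk] at hdm <;> rw [hvb1]
      · have harg : pvVal a1 + M - 2 * w % M = pvVal a + M - pvVal b := by omega
        rw [harg]
      · have harg : pvVal a1 + M - 2 * w % M = (pvVal a + M - pvVal b) + M := by omega
        rw [harg, Nat.add_mod_right]

-- Python's (x - 2*y) % M for 0 ≤ x,y < M, written over Nat
theorem pvInt_mod_eq (x y M : Nat) (hx : x < M) (hy : y < M) (hM : 0 < M) :
    (PySem.Int.mod ((x:Int) - 2*(y:Int)) ((M:Int))).toNat = (x + M - (2*y) % M) % M := by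
  rw [PySem.Int.mod_eq_emod_of_pos (by exact_mod_cast hM)]
  have hdm := Nat.div_add_mod (2*y) M
  have hklt : (2*y)/M ≤ 1 := by
    have := (Nat.div_lt_iff_lt_mul hM).mpr (by omega : 2*y < 2*M)
    omega
  have hqlt : (2*y) % M < M := Nat.mod_lt _ hM
  set q := (2*y) % M with hq
  have hmain : ((x:Int) - 2*(y:Int)) % (M:Int) = ((x:Int) - (q:Int)) % (M:Int) := by
    rcases Nat.le_one_iff_eq_zero_or_eq_one.mp hklt with hk | hk <;> rw [hk] at hdm
    · have h1 : (x:Int) - 2*(y:Int) = (x:Int) - (q:Int) := by omega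
      rw [h1]
    · have h1 : (x:Int) - 2*(y:Int) = ((x:Int) - (q:Int)) - (M:Int) := by omega
      rw [h1, Int.sub_emod_right]
  rw [hmain]
  by_cases hxq : q ≤ x
  · have h1 : ((x:Int) - (q:Int)) % (M:Int) = (x:Int) - (q:Int) :=
      Int.emod_eq_of_lt (by omega) (by omega)
    rw [h1]
    have h2 : x + M - q = (x - q) + M := by omega
    rw [h2, Nat.add_mod_right, Nat.mod_eq_of_lt (by omega)]
    omega
  · have h1 : ((x:Int) - (q:Int) + M) % (M:Int) = ((x:Int) - (q:Int)) % (M:Int) := by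
      have h0 := Int.add_mul_emod_self_left (a := (x:Int) - (q:Int)) (b := (M:Int)) (c := 1)
      rwa [mul_one] at h0
    have h2 : ((x:Int) - (q:Int) + M) % (M:Int) = (x:Int) - (q:Int) + M :=
      Int.emod_eq_of_lt (by omega) (by omega)
    rw [← h1, h2, Nat.mod_eq_of_lt (by omega)]
    omega

-- ===== VERDICT (by name: the statement is the Claim_ definition above) =====
theorem ripple_subtract_binary_spec : Claim_equal_ripple_subtract_binary := by
  unfold Claim_equal_ripple_subtract_binary
  intro a b _
  unfold Spec_ripple_subtract_binary ripple_subtract_binary ripple_subtract_binary_alt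
  dsimp only
  set A := a.toList with hA
  set B := b.toList with hB
  set n := max A.length B.length with hn
  set a' := pvZfill A n with ha'
  set b' := pvZfill B n with hb'
  have hpadAB : pvPadEqual A B = (a', b') := rfl
  have hla : a'.length = n := by rw [ha', pvZfill_length]; omega
  have hlb : b'.length = n := by rw [hb', pvZfill_length]; omega
  rw [hpadAB]
  by_cases hz : b'.all (· = '0') = true
  · have hloop : pvLoop (a'.length + 1) a' b' = a' := by
      rw [pvLoop, if_pos (show pvIsAllZero b' = true from hz)]
    rw [hloop, if_pos hz]
  · rw [if_neg hz]
    have hz2 : ¬ pvIsAllZero b' = true := hz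
    rw [hla, pvLoop, if_neg hz2]
    -- the pads inside the bitwise helpers are no-ops
    have hpad : pvPadEqual a' b' = (a', b') := by
      simp [pvPadEqual, hla, hlb, pvZfill_of_le]
    have hpadn : pvPadEqual (pvBitwiseNot a') b' = (pvBitwiseNot a', b') := by
      simp [pvPadEqual, pvBitwiseNot, hla, hlb, pvZfill_of_le]
    have hxor : pvBitwiseXor a' b' = List.zipWith pvXorG a' b' := by
      rw [pvBitwiseXor, hpad]
    have hand : pvBitwiseAnd (pvBitwiseNot a') b'
        = List.zipWith (fun p q => pvAndG (pvNotG p) q) a' b' := by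
      rw [pvBitwiseAnd, hpadn, pvBitwiseNot, List.zipWith_map_left]
    set a1 := List.zipWith pvXorG a' b' with ha1
    set borrow := List.zipWith (fun p q => pvAndG (pvNotG p) q) a' b' with hbor
    have hla1 : a1.length = n := by simp [ha1, hla, hlb]
    have hlbor : borrow.length = n := by simp [hbor, hla, hlb]
    obtain ⟨htz1, htzb⟩ := pvStep_tz a' b' n hla hlb hz
    have hn1 : 1 ≤ n := by omega
    have hbornil : borrow ≠ [] := by
      intro hx; rw [hx] at hlbor; simp at hlbor; omega
    have hshift : pvShiftLeft borrow 1 = borrow.drop 1 ++ ['0'] := by simp [pvShiftLeft]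
    set b1 := borrow.drop 1 ++ ['0'] with hb1
    have hlb1 : b1.length = n := by simp [hb1, hlbor]; omega
    have hbba1 : PvBin a1 := pvBin_zipWith _ (by
      intro p q; by_cases h : p = q <;> simp [pvXorG, h]) a' b'
    have hbbb1 : PvBin b1 := by
      intro c hc
      rcases List.mem_append.mp hc with hc | hc
      · exact pvBin_zipWith _ (by
          intro p q
          by_cases h : pvNotG p = '1' ∧ q = '1' <;> simp [pvAndG, h]) a' b' c
          (List.mem_of_mem_drop hc)
      · simp at hc; left; exact hc
    obtain ⟨hbinres, hvalres⟩ := pvLoop_val n n a1 b1 hbba1 hbbb1 hla1 hlb1 (by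
      have := htz1; omega)
    rw [hxor, hand, hshift]
    rw [pvLstrip0OrZero_eq_pvBin _ hbinres, hvalres]
    -- B's two masks are A's gate compositions
    have hxl : (fun p q => if p ≠ q then '1' else '0') = pvXorG := rfl
    rw [hxl, ← pvBorrow_lambda, ← ha1, ← hbor]
    -- and the Int arithmetic agrees with the loop's value
    have hvb1 : pvVal b1 = (2 * pvVal borrow) % 2 ^ n := by
      rw [hb1, ← hlbor]
      exact pvVal_shift borrow hbornil
    have hM : 0 < 2 ^ n := pow_pos (by omega : (0:ℕ) < 2) n
    have hva1 : pvVal a1 < 2 ^ n := hla1 ▸ pvVal_lt a1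
    have hvbor : pvVal borrow < 2 ^ n := hlbor ▸ pvVal_lt borrow
    rw [hvb1, ← pvInt_mod_eq _ _ _ hva1 hvbor hM]
    rw [show (((2:Nat) ^ n : Nat) : Int) = (2:Int) ^ n by push_cast; rfl]
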